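-- pv_equiv track=rewrite | github.com/Kenbo0601/crypto_project1 | decryption.py | build_64bit_blocks
-- ===== SOURCE A (Python) =====
-- def build_64bit_blocks(binarizedWord):
--     array = []
--     n = 1
--     for i in range(0, len(binarizedWord), n):
--         array.append(binarizedWord[i:i+n])
--     array.reverse()
--
--     reversedBits = "".join(array)
--     array.clear()
--
--     for j in range(0, len(reversedBits), 64):
--         array.append(reversedBits[j:j+64])
--
--     # reverse back array and grab the first element for padding
--     array.reverse()
--     temp = []
--     for k in range(0, len(array[0]), n):
--         temp.append(array[0][k:k+n])
--
--     temp.reverse()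
--     letsPadding = "".join(temp)
--     padded = letsPadding.zfill(64)
--
--     # remove the first element, don't need it anymore
--     array.pop(0)
--     restOfBits = "".join(array)
--     array.clear()
--
--     # now need to reverse back the rest of the bits
--     for back in range(0, len(restOfBits), n):
--         array.append(restOfBits[back:back+n])
--     array.reverse()
--     motodouri = "".join(array)
--     array.clear()
--
--     array.append(padded)
--     array.append(motodouri)
--     finalProcess = "".join(array)
--     array.clear()
--
--     for a in range(0, len(finalProcess), 64):
--         array.append(finalProcess[a:a+64])
--
--     return array
-- ===== SOURCE B (Python) =====
-- def build_64bit_blocks(binarizedWord):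
--     # Chunk from the right in one pass: blocks come out rightmost-first,
--     # the last collected block is the (possibly short) leftmost piece.
--     blocks = []
--     i = len(binarizedWord)
--     while i > 0:
--         blocks.append(binarizedWord[max(0, i - 64):i])
--         i -= 64
--     head = blocks[-1]  # IndexError on empty input, like the original
--     return [head.zfill(64)] + blocks[:-1]
-- ===== Notes on version B (the rewrite author's own statement) =====
-- stated objective: simpler
-- what changed: Instead of reversing the string character by character, chunking the reversal, un-reversing the head and tail character by character and re-chunking the concatenation, B chunks the string from the right in a single loop (blocks naturally come out rightmost-first, matching A's output order) and pads the leftmost short piece.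
import Mathlib
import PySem

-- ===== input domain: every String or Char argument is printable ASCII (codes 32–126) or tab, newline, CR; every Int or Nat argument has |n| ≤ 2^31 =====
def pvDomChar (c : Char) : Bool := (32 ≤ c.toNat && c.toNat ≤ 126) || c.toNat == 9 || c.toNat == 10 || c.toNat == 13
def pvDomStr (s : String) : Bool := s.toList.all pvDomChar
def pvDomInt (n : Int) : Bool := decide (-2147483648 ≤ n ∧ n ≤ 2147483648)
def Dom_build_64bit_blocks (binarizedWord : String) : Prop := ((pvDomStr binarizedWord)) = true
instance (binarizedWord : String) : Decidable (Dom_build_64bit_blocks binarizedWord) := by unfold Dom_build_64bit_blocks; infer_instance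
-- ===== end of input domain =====

-- B chunks the string from the right in one loop; reversers/re-chunkers of A disappear.
-- Equivalence is proved for every non-empty string; on "" both Pythons raise IndexError.

-- ===== PORT A =====
-- A works on characters; the port works on `List Char` (PySem.Chars level) and wraps
-- the resulting blocks with `String.ofList` at the end.
def build_64bit_blocks_core (w : List Char) : List (List Char) :=
  -- for i in range(0, len(binarizedWord), 1): array.append(binarizedWord[i:i+1])
  let array := (PySem.List.pyRange 0 (w.length : Int) 1).foldl
      (fun a i => a ++ [PySem.Chars.slice w (some i) (some (i + 1))]) []
  let array := array.reverse
  let reversedBits := PySem.Chars.join [] array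
  -- for j in range(0, len(reversedBits), 64): array.append(reversedBits[j:j+64])
  let array := (PySem.List.pyRange 0 (reversedBits.length : Int) 64).foldl
      (fun a j => a ++ [PySem.Chars.slice reversedBits (some j) (some (j + 64))]) []
  let array := array.reverse
  -- array[0] raises IndexError on empty input: excluded by Pre_; pyGetD's default is never used inside Pre_
  let first := PySem.List.pyGetD array 0 []
  -- for k in range(0, len(array[0]), 1): temp.append(array[0][k:k+1])
  let temp := (PySem.List.pyRange 0 (first.length : Int) 1).foldl
      (fun a k => a ++ [PySem.Chars.slice first (some k) (some (k + 1))]) []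
  let temp := temp.reverse
  let letsPadding := PySem.Chars.join [] temp
  let padded := PySem.Chars.zfill letsPadding 64
  -- array.pop(0)
  let array := array.drop 1
  let restOfBits := PySem.Chars.join [] array
  -- for back in range(0, len(restOfBits), 1): array.append(restOfBits[back:back+1])
  let array := (PySem.List.pyRange 0 (restOfBits.length : Int) 1).foldl
      (fun a b => a ++ [PySem.Chars.slice restOfBits (some b) (some (b + 1))]) []
  let array := array.reverse
  let motodouri := PySem.Chars.join [] array
  let finalProcess := PySem.Chars.join [] [padded, motodouri]
  -- for a in range(0, len(finalProcess), 64): array.append(finalProcess[a:a+64])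
  (PySem.List.pyRange 0 (finalProcess.length : Int) 64).foldl
      (fun a x => a ++ [PySem.Chars.slice finalProcess (some x) (some (x + 64))]) []

def build_64bit_blocks (binarizedWord : String) : List String :=
  (build_64bit_blocks_core binarizedWord.toList).map String.ofList

-- ===== PORT B =====
-- while i > 0: blocks.append(s[max(0, i-64):i]); i -= 64
def altChunkLoop (w : List Char) (i : Int) (blocks : List (List Char)) : List (List Char) :=
  if 0 < i then
    altChunkLoop w (i - 64) (blocks ++ [PySem.Chars.slice w (some (max 0 (i - 64))) (some i)])
  else blocks
termination_by i.toNat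
decreasing_by omega

def build_64bit_blocks_alt (binarizedWord : String) : List String :=
  let w := binarizedWord.toList
  let blocks := altChunkLoop w (w.length : Int) []
  -- blocks[-1] raises IndexError on empty input: excluded by Pre_
  let head := PySem.List.pyGetD blocks (-1) []
  (PySem.Chars.zfill head 64 :: PySem.List.slice blocks none (some (-1))).map String.ofList

-- ===== PRECONDITION & SPEC =====
-- Pre_ excludes exactly the empty string, on which both Pythons raise IndexError (array[0] / blocks[-1]).
def Pre_build_64bit_blocks (binarizedWord : String) : Prop := binarizedWord ≠ ""
instance (binarizedWord : String) : Decidable (Pre_build_64bit_blocks binarizedWord) := by unfold Pre_build_64bit_blocks; infer_instance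
def pvWitness_build_64bit_blocks : String := "0110"
def Spec_build_64bit_blocks (binarizedWord : String) (out : List String) : Prop := out = build_64bit_blocks_alt binarizedWord
instance (binarizedWord : String) (out : List String) : Decidable (Spec_build_64bit_blocks binarizedWord out) := by unfold Spec_build_64bit_blocks; infer_instance

-- ===== CLAIM (what is proved, stated in full; the proofs are below) =====
def Claim_equal_build_64bit_blocks : Prop := ∀ (binarizedWord : String), Dom_build_64bit_blocks binarizedWord → Pre_build_64bit_blocks binarizedWord → Spec_build_64bit_blocks binarizedWord (build_64bit_blocks binarizedWord)

-- ===== LEMMAS AND PROOFS =====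

theorem join_nil_flatten (xs : List (List Char)) : PySem.Chars.join [] xs = xs.flatten := by
  induction xs with
  | nil => rfl
  | cons a t ih => cases t with
    | nil => simp [PySem.Chars.join_singleton]
    | cons b u => simp_all [PySem.Chars.join_cons_cons]

-- the per-character split loop builds the list of singleton strings
theorem singles_map (t : List Char) :
    (PySem.List.pyRange 0 (t.length : Int) 1).foldl
      (fun a i => a ++ [PySem.Chars.slice t (some i) (some (i + 1))]) []
    = t.map (fun c => [c]) := by
  rw [PySem.List.foldl_append_singleton_eq_map, PySem.List.pyRange_one]
  simp only [List.nil_append, List.map_map, Int.sub_zero, Int.toNat_natCast]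
  apply List.ext_getElem
  · simp
  · intro k h1 h2
    simp only [List.getElem_map, List.getElem_range, Function.comp_apply]
    have h2' : k < t.length := by simpa using h2
    have hs : PySem.Chars.slice t (some (0 + (k : Int))) (some (0 + (k : Int) + 1)) =
        (t.drop k).take 1 := by
      have h0 : (0 + (k : Int)) = ((k : Nat) : Int) := by omega
      rw [h0]
      have h1' : ((k : Nat) : Int) + 1 = ((k : Nat) : Int) + ((1 : Nat) : Int) := by norm_num
      rw [h1']
      exact PySem.List.slice_natCast_add t k 1
    rw [hs, List.take_one_drop_eq_of_lt_length h2']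
    simp

-- split into characters, reverse, join: the string reversed
theorem revPattern (t : List Char) :
    PySem.Chars.join []
      (((PySem.List.pyRange 0 (t.length : Int) 1).foldl
        (fun a i => a ++ [PySem.Chars.slice t (some i) (some (i + 1))]) []).reverse)
    = t.reverse := by
  rw [singles_map]
  rw [← List.map_reverse]
  exact PySem.Chars.join_nil_singletons t.reverse

-- chunking into 64-character blocks, left to right
def chunks (c : List Char) : List (List Char) :=
  if hc : c = [] then [] else c.take 64 :: chunks (c.drop 64)
termination_by c.length
decreasing_by
  have := List.length_pos_of_ne_nil hc
  simp only [List.length_drop]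
  omega

theorem chunks_nil : chunks [] = [] := by rw [chunks]; simp

theorem chunks_cons (t : List Char) (h : t ≠ []) :
    chunks t = t.take 64 :: chunks (t.drop 64) := by
  rw [chunks, dif_neg h]

def ceil64 (n : Nat) : Nat := (n + 63) / 64

theorem chunks_eq_map (t : List Char) :
    chunks t = (List.range (ceil64 t.length)).map (fun k => (t.drop (64 * k)).take 64) := by
  induction t using chunks.induct with
  | case1 => simp [chunks_nil, ceil64]
  | case2 t h ih =>
    have hL : 1 ≤ t.length := List.length_pos_of_ne_nil h
    have hc : ceil64 t.length = ceil64 (t.length - 64) + 1 := by unfold ceil64; omega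
    rw [chunks_cons t h, hc, List.range_succ_eq_map]
    simp only [List.map_cons, List.map_map, Nat.mul_zero, List.drop_zero]
    congr 1
    rw [ih]
    simp only [List.length_drop]
    apply List.map_congr_left
    intro k _
    simp only [Function.comp_apply, List.drop_drop]
    congr 2
    omega

theorem chunkPattern (t : List Char) :
    (PySem.List.pyRange 0 (t.length : Int) 64).foldl
      (fun a j => a ++ [PySem.Chars.slice t (some j) (some (j + 64))]) []
    = chunks t := by
  rw [PySem.List.foldl_append_singleton_eq_map,
      PySem.List.pyRange_of_pos 0 (t.length : Int) (by norm_num)]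
  simp only [List.nil_append, List.map_map]
  rw [chunks_eq_map]
  have hcnt : (if (0 : Int) < (t.length : Int)
      then (((t.length : Int) - 0 + 64 - 1) / 64).toNat else 0) = ceil64 t.length := by
    unfold ceil64
    split_ifs with h
    · omega
    · omega
  rw [hcnt]
  apply List.map_congr_left
  intro k _
  simp only [Function.comp_apply]
  have hcast : (0 : Int) + 64 * (k : Int) = ((64 * k : Nat) : Int) := by omega
  rw [hcast]
  have hcast2 : ((64 * k : Nat) : Int) + 64 = ((64 * k : Nat) : Int) + ((64 : Nat) : Int) := by
    norm_num
  rw [hcast2]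
  exact PySem.List.slice_natCast_add t (64 * k) 64

theorem chunks_len_le (t : List Char) : ∀ c ∈ chunks t, c.length ≤ 64 := by
  induction t using chunks.induct with
  | case1 => simp [chunks_nil]
  | case2 t h ih =>
    rw [chunks_cons t h]
    intro c hc
    rcases List.mem_cons.mp hc with rfl | hc
    · simp
    · exact ih c hc

theorem chunks_eq_nil_iff (t : List Char) : chunks t = [] ↔ t = [] := by
  constructor
  · intro hx
    by_contra hne
    rw [chunks_cons t hne] at hx
    simp at hx
  · intro hx; subst hx; exact chunks_nil

theorem chunks_dropLast_len (t : List Char) : ∀ c ∈ (chunks t).dropLast, c.length = 64 := by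
  induction t using chunks.induct with
  | case1 => simp [chunks_nil]
  | case2 t h ih =>
    rw [chunks_cons t h]
    intro c hc
    by_cases hd : t.drop 64 = []
    · rw [hd, chunks_nil] at hc
      simp at hc
    · have hne : chunks (t.drop 64) ≠ [] := fun hx => hd ((chunks_eq_nil_iff _).mp hx)
      rw [List.dropLast_cons_of_ne_nil hne] at hc
      rcases List.mem_cons.mp hc with rfl | hc
      · have h64 : 64 < t.length := by
          have := List.length_pos_of_ne_nil hd
          simp only [List.length_drop] at this
          omega
        simp [List.length_take]
        omega
      · exact ih c hc

theorem chunks_append_64 (p q : List Char) (hp : p.length = 64) :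
    chunks (p ++ q) = p :: chunks q := by
  have hne : p ++ q ≠ [] := by
    intro hx
    rw [List.append_eq_nil_iff] at hx
    rw [hx.1] at hp
    simp at hp
  rw [chunks_cons _ hne, ← hp, List.take_left, List.drop_left]

theorem chunks_flatten_64 (bs : List (List Char)) (h : ∀ b ∈ bs, b.length = 64) :
    chunks bs.flatten = bs := by
  induction bs with
  | nil => exact chunks_nil
  | cons b t ih =>
    simp only [List.flatten_cons]
    rw [chunks_append_64 b t.flatten (h b (by simp))]
    rw [ih (fun x hx => h x (by simp [hx]))]

-- B's loop collects, rightmost-first, the reversed 64-chunks of the reversed prefix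
theorem altChunkLoop_eq (w : List Char) (i : Int) (acc : List (List Char)) :
    i ≤ (w.length : Int) →
    altChunkLoop w i acc = acc ++ (chunks ((w.take i.toNat).reverse)).map List.reverse := by
  fun_induction altChunkLoop w i acc with
  | case1 i acc hpos ih =>
    intro hi
    obtain ⟨n, rfl⟩ : ∃ n : Nat, i = (n : Int) := ⟨i.toNat, by omega⟩
    rw [ih (by omega)]
    rw [List.append_assoc]
    congr 1
    have e1 : ((n : Int)).toNat = n := by omega
    have e2 : ((n : Int) - 64).toNat = n - 64 := by omega
    rw [e1, e2]
    have hn1 : 1 ≤ n := by omega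
    have hnL : n ≤ w.length := by omega
    have hlen : (w.take n).length = n := by simp; omega
    have hmax : max 0 ((n : Int) - 64) = ((n - 64 : Nat) : Int) := by omega
    have hieq : (n : Int) = ((n - 64 : Nat) : Int) + ((n - (n - 64) : Nat) : Int) := by omega
    have hslice : PySem.Chars.slice w (some (max 0 ((n : Int) - 64))) (some (n : Int))
        = (w.drop (n - 64)).take (n - (n - 64)) := by
      rw [hmax]
      conv_lhs => rw [hieq]
      exact PySem.List.slice_natCast_add w (n - 64) (n - (n - 64))
    have hne : (w.take n).reverse ≠ [] := by
      simp only [ne_eq, List.reverse_eq_nil_iff]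
      intro hx
      have := congrArg List.length hx
      simp only [hlen, List.length_nil] at this
      omega
    rw [chunks_cons _ hne]
    simp only [List.map_cons]
    have htake : ((w.take n).reverse).take 64 = ((w.drop (n - 64)).take (n - (n - 64))).reverse := by
      rw [List.take_reverse, hlen, List.drop_take]
    have hdrop : ((w.take n).reverse).drop 64 = (w.take (n - 64)).reverse := by
      rw [List.drop_reverse, hlen, List.take_take]
      congr 2
      omega
    rw [htake, hdrop, hslice]
    simp
  | case2 i acc hpos =>
    intro _
    have h0 : i.toNat = 0 := by omega
    rw [h0]
    simp [chunks_nil]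

theorem pyGetD_last {α : Type} (ys : List α) (y : α) (d : α) :
    PySem.List.pyGetD (ys ++ [y]) (-1) d = y := by
  simp [PySem.List.pyGetD, PySem.List.pyGet?, PySem.List.pyIdx?]

theorem pyGetD_head {α : Type} (y : α) (ys : List α) (d : α) :
    PySem.List.pyGetD (y :: ys) 0 d = y := by
  simp [PySem.List.pyGetD, PySem.List.pyGet?, PySem.List.pyIdx?]

-- A's core, in closed form: padded reversed-last-chunk, then the other chunks reversed
theorem core_A_eq (w : List Char) (ds : List (List Char)) (e : List Char)
    (hde : chunks w.reverse = ds ++ [e]) :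
    build_64bit_blocks_core w = PySem.Chars.zfill e.reverse 64 :: ds.map List.reverse := by
  unfold build_64bit_blocks_core
  simp only []
  rw [revPattern w]
  rw [chunkPattern w.reverse, hde]
  simp only [List.reverse_append, List.reverse_cons, List.reverse_nil, List.nil_append,
      List.singleton_append]
  rw [pyGetD_head]
  rw [revPattern e]
  rw [List.drop_one, List.tail_cons]
  rw [join_nil_flatten ds.reverse]
  rw [revPattern (ds.reverse.flatten)]
  have hmoto : (ds.reverse.flatten).reverse = (ds.map List.reverse).flatten := by
    rw [List.reverse_flatten]
    simp
  rw [hmoto]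
  have hjoin2 : ∀ (p m : List Char), PySem.Chars.join [] [p, m] = p ++ m := by
    intro p m
    rw [PySem.Chars.join_cons_cons, PySem.Chars.join_singleton]
    simp
  rw [hjoin2]
  have hpadlen : (PySem.Chars.zfill e.reverse 64).length = 64 := by
    rw [PySem.Chars.length_zfill]
    have he : e ∈ chunks w.reverse := by rw [hde]; simp
    have := chunks_len_le w.reverse e he
    simp only [List.length_reverse]
    omega
  have hall64 : ∀ b ∈ ds.map List.reverse, b.length = 64 := by
    intro b hb
    rcases List.mem_map.mp hb with ⟨c, hc, rfl⟩
    have hcm : c ∈ (chunks w.reverse).dropLast := by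
      rw [hde, List.dropLast_concat]
      exact hc
    have := chunks_dropLast_len w.reverse c hcm
    simpa using this
  rw [chunkPattern (PySem.Chars.zfill e.reverse 64 ++ (ds.map List.reverse).flatten)]
  rw [chunks_append_64 _ _ hpadlen, chunks_flatten_64 _ hall64]

-- B's core value coincides
theorem core_B_eq (w : List Char) (ds : List (List Char)) (e : List Char)
    (hde : chunks w.reverse = ds ++ [e]) :
    altChunkLoop w (w.length : Int) [] = ds.map List.reverse ++ [e.reverse] := by
  rw [altChunkLoop_eq w (w.length : Int) [] (by omega)]
  simp only [Int.toNat_natCast, List.take_length, List.nil_append]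
  rw [hde]
  simp

theorem toList_ne_nil (s : String) (h : s ≠ "") : s.toList ≠ [] := by
  intro hn
  apply h
  have hx : s.toList = ("" : String).toList := by simpa using hn
  exact String.toList_inj.mp hx

-- ===== VERDICT (by name: the statement is the Claim_ definition above) =====
theorem build_64bit_blocks_spec : Claim_equal_build_64bit_blocks := by
  intro s _ hpre
  unfold Spec_build_64bit_blocks
  have hw : s.toList ≠ [] := toList_ne_nil s hpre
  have hrev : (s.toList).reverse ≠ [] := by simpa using hw
  have hcne : chunks (s.toList).reverse ≠ [] :=
    fun hx => hrev ((chunks_eq_nil_iff _).mp hx)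
  rcases List.eq_nil_or_concat (chunks (s.toList).reverse) with h | ⟨ds, e, hde⟩
  · exact absurd h hcne
  rw [List.concat_eq_append] at hde
  unfold build_64bit_blocks build_64bit_blocks_alt
  simp only []
  rw [core_A_eq s.toList ds e hde, core_B_eq s.toList ds e hde]
  rw [pyGetD_last, PySem.List.slice_to_neg_one, List.dropLast_concat]
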